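-- pv_equiv track=rewrite | github.com/abcdefguan/piano_game | music.py | pace_to_str
-- ===== SOURCE A (Python) =====
-- def pace_to_str(pace):
-- 	pace_text = [(24, "Larghissimo"), (40, "Grave"), (60, "Largo"), \
-- 	(76, "Adagio"), (108, "Andante"), (120, "Moderato"), \
-- 	(156, "Allegro"), (176, "Vivace"), (200, "Presto")]
-- 	pace_name = "Prestissimo"
-- 	for (max_pace, name) in pace_text:
-- 		if pace <= max_pace:
-- 			pace_name = name
-- 			break
-- 	return "{} {}".format(pace_name, int(pace))
-- ===== SOURCE B (Python) =====
-- def pace_to_str(pace):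
--     thresholds = [24, 40, 60, 76, 108, 120, 156, 176, 200]
--     names = ["Larghissimo", "Grave", "Largo", "Adagio", "Andante",
--              "Moderato", "Allegro", "Vivace", "Presto"]
--     lo, hi = 0, len(thresholds)
--     while lo < hi:
--         mid = (lo + hi) // 2
--         if thresholds[mid] < pace:
--             lo = mid + 1
--         else:
--             hi = mid
--     name = names[lo] if lo < len(names) else "Prestissimo"
--     return "{} {}".format(name, int(pace))
-- ===== Notes on version B (the rewrite author's own statement) =====
-- stated objective: alternative
-- what changed: Replaced the linear scan over (threshold, name) pairs with a hand-written binary search (bisect_left) over a sorted thresholds list and a parallel names list.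
import Mathlib
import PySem

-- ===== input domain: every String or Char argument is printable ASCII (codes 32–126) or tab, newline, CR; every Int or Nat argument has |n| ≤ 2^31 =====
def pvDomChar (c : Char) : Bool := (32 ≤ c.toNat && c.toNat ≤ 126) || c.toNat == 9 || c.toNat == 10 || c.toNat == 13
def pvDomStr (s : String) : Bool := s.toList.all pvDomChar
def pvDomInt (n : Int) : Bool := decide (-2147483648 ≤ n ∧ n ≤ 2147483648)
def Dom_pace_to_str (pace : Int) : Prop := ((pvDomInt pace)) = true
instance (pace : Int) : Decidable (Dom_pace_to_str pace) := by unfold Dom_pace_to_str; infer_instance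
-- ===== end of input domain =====

-- B replaces A's linear scan of the tempo table with a binary search (bisect_left) over
-- a sorted thresholds list and a parallel names list; same return value, alternative algorithm.

-- ===== PORT A =====
-- the for-loop with break: first (max_pace, name) with pace ≤ max_pace wins, else the default
def paceLoopA (pace : Int) (xs : List (Int × String)) (cur : String) : String :=
  match xs with
  | [] => cur
  | (max_pace, name) :: rest =>
    if pace ≤ max_pace then name else paceLoopA pace rest cur

def pace_to_str (pace : Int) : String :=
  let pace_text : List (Int × String) :=
    [(24, "Larghissimo"), (40, "Grave"), (60, "Largo"),
     (76, "Adagio"), (108, "Andante"), (120, "Moderato"),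
     (156, "Allegro"), (176, "Vivace"), (200, "Presto")]
  let pace_name := paceLoopA pace pace_text "Prestissimo"
  pace_name ++ " " ++ PySem.Int.toStr pace

-- ===== PORT B =====
-- the while-loop of Source B's hand-written bisect_left; fuel only makes it structurally total
def bisectGo (xs : List Int) (x : Int) : Nat → Nat → Nat → Nat
  | 0, lo, _ => lo
  | fuel + 1, lo, hi =>
    if lo < hi then
      let mid := (lo + hi) / 2
      if xs.getD mid 0 < x then bisectGo xs x fuel (mid + 1) hi
      else bisectGo xs x fuel lo mid
    else lo

def pace_to_str_alt (pace : Int) : String :=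
  let thresholds : List Int := [24, 40, 60, 76, 108, 120, 156, 176, 200]
  let names : List String :=
    ["Larghissimo", "Grave", "Largo", "Adagio", "Andante",
     "Moderato", "Allegro", "Vivace", "Presto"]
  let lo := bisectGo thresholds pace (thresholds.length + 1) 0 thresholds.length
  let name := if lo < names.length then names.getD lo "" else "Prestissimo"
  name ++ " " ++ PySem.Int.toStr pace

-- ===== PRECONDITION & SPEC =====
def Spec_pace_to_str (pace : Int) (out : String) : Prop := out = pace_to_str_alt pace
instance (pace : Int) (out : String) : Decidable (Spec_pace_to_str pace out) := by unfold Spec_pace_to_str; infer_instance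

-- ===== CLAIM (what is proved, stated in full; the proofs are below) =====
def Claim_equal_pace_to_str : Prop := ∀ (pace : Int), Dom_pace_to_str pace → Spec_pace_to_str pace (pace_to_str pace)

-- ===== LEMMAS AND PROOFS =====
theorem pace_eq (pace : Int) : pace_to_str pace = pace_to_str_alt pace := by
  by_cases h24 : pace ≤ 24
  · have a108 : ¬((108:Int) < pace) := by omega
    have a60 : ¬((60:Int) < pace) := by omega
    have a40 : ¬((40:Int) < pace) := by omega
    have a24 : ¬((24:Int) < pace) := by omega
    simp [pace_to_str, pace_to_str_alt, paceLoopA, bisectGo, h24, a108, a60, a40, a24]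
  · by_cases h40 : pace ≤ 40
    · have a108 : ¬((108:Int) < pace) := by omega
      have a60 : ¬((60:Int) < pace) := by omega
      have a40 : ¬((40:Int) < pace) := by omega
      have a24 : (24:Int) < pace := by omega
      simp [pace_to_str, pace_to_str_alt, paceLoopA, bisectGo, h24, h40, a108, a60, a40, a24]
    · by_cases h60 : pace ≤ 60
      · have a108 : ¬((108:Int) < pace) := by omega
        have a60 : ¬((60:Int) < pace) := by omega
        have a40 : (40:Int) < pace := by omega
        simp [pace_to_str, pace_to_str_alt, paceLoopA, bisectGo, h24, h40, h60, a108, a60, a40]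
      · by_cases h76 : pace ≤ 76
        · have a108 : ¬((108:Int) < pace) := by omega
          have a60 : (60:Int) < pace := by omega
          have a76 : ¬((76:Int) < pace) := by omega
          simp [pace_to_str, pace_to_str_alt, paceLoopA, bisectGo, h24, h40, h60, h76, a108, a60, a76]
        · by_cases h108 : pace ≤ 108
          · have a108 : ¬((108:Int) < pace) := by omega
            have a60 : (60:Int) < pace := by omega
            have a76 : (76:Int) < pace := by omega
            simp [pace_to_str, pace_to_str_alt, paceLoopA, bisectGo, h24, h40, h60, h76, h108, a108, a60, a76]
          · by_cases h120 : pace ≤ 120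
            · have a108 : (108:Int) < pace := by omega
              have a176 : ¬((176:Int) < pace) := by omega
              have a156 : ¬((156:Int) < pace) := by omega
              have a120 : ¬((120:Int) < pace) := by omega
              simp [pace_to_str, pace_to_str_alt, paceLoopA, bisectGo, h24, h40, h60, h76, h108, h120, a108, a176, a156, a120]
            · by_cases h156 : pace ≤ 156
              · have a108 : (108:Int) < pace := by omega
                have a176 : ¬((176:Int) < pace) := by omega
                have a156 : ¬((156:Int) < pace) := by omega
                have a120 : (120:Int) < pace := by omega
                simp [pace_to_str, pace_to_str_alt, paceLoopA, bisectGo, h24, h40, h60, h76, h108, h120, h156, a108, a176, a156, a120]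
              · by_cases h176 : pace ≤ 176
                · have a108 : (108:Int) < pace := by omega
                  have a156 : (156:Int) < pace := by omega
                  have a176 : ¬((176:Int) < pace) := by omega
                  simp [pace_to_str, pace_to_str_alt, paceLoopA, bisectGo, h24, h40, h60, h76, h108, h120, h156, h176, a108, a156, a176]
                · by_cases h200 : pace ≤ 200
                  · have a108 : (108:Int) < pace := by omega
                    have a156 : (156:Int) < pace := by omega
                    have a176 : (176:Int) < pace := by omega
                    have a200 : ¬((200:Int) < pace) := by omega
                    simp [pace_to_str, pace_to_str_alt, paceLoopA, bisectGo, h24, h40, h60, h76, h108, h120, h156, h176, h200, a108, a176, a200]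
                  · have a108 : (108:Int) < pace := by omega
                    have a156 : (156:Int) < pace := by omega
                    have a176 : (176:Int) < pace := by omega
                    have a200 : (200:Int) < pace := by omega
                    simp [pace_to_str, pace_to_str_alt, paceLoopA, bisectGo, h24, h40, h60, h76, h108, h120, h156, h176, h200, a108, a176, a200]

-- ===== VERDICT (by name: the statement is the Claim_ definition above) =====
theorem pace_to_str_spec : Claim_equal_pace_to_str := by
  intro pace _
  exact pace_eq pace
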